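-- pv_equiv track=rewrite | github.com/pozorvlak/cassidoo | 2021/2021-06-21_draw_cube/draw_cube.py | draw_cube
-- ===== SOURCE A (Python) =====
-- def horizontal_edge(n):
--     return "+" + ("-" * 2 * n) + "+"
--
-- def gap(n):
--     return " " * n
--
-- def draw_cube(n):
--     diag_rows = n // 2
--     cube = gap(diag_rows + 1) + horizontal_edge(n) + "\n"
--     for i in range(diag_rows, 0, -1):
--         cube += gap(i) + "/" + gap(2 * n) + "/" + gap(diag_rows - i) + "|\n"
--     cube += horizontal_edge(n) + gap(diag_rows) + "|\n"
--     for i in range(n - diag_rows - 1):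
--         cube += "|" + gap(2 * n) + "|" + gap(diag_rows) + "|\n"
--     cube += "|" + gap(2 * n) + "|" + gap(diag_rows) + "+\n"
--     for i in range(diag_rows, 0, -1):
--         cube += "|" + gap(2 * n) + "|" + gap(i - 1) + "/\n"
--     cube += horizontal_edge(n)
--     cube += "\n"
--     return cube
-- ===== SOURCE B (Python) =====
-- def draw_cube(n):
--     # Vector-stroke rasterizer: describe the cube as geometric strokes (edge and
--     # diagonal point lists), then scan the point list per row filling gaps with spaces.
--     d = n // 2
--     body = max(n - d - 1, 0)
--     h = 2 * d + body + 4
--     top = 2 * n + d + 2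
--     strokes = []
--     strokes += [(0, c, '+' if c == d + 1 or c == top else '-') for c in range(d + 1, top + 1)]
--     strokes += [(r, d + 1 - r, '/') for r in range(1, d + 1)]
--     strokes += [(r, 0, '|') for r in range(d + 2, h - 1)]
--     strokes += [(d + 1, c, '+' if c == 0 or c == 2 * n + 1 else '-') for c in range(0, 2 * n + 2)]
--     strokes += [(r, 2 * n + 1, '|') for r in range(d + 2, h - 1)]
--     strokes += [(r, top - r, '/') for r in range(1, d + 1)]
--     strokes += [(r, 2 * n + h - r, '/') for r in range(d + 3 + body, h - 1)]
--     strokes += [(r, top, '|') for r in range(1, d + 2 + body)]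
--     strokes.append((d + 2 + body, top, '+'))
--     strokes += [(h - 1, c, '+' if c == 0 or c == 2 * n + 1 else '-') for c in range(0, 2 * n + 2)]
--     buckets = {}
--     for (r, c, ch) in strokes:
--         buckets.setdefault(r, []).append((c, ch))
--     rows = []
--     for r in range(h):
--         cur = 0
--         line = []
--         for (c, ch) in buckets.get(r, []):
--             line.append(' ' * (c - cur))
--             line.append(ch)
--             cur = c + 1
--         rows.append(''.join(line))
--     return '\n'.join(rows) + '\n'
-- ===== Notes on version B (the rewrite author's own statement) =====
-- stated objective: alternative
-- what changed: A concatenates per-region formula strings in seven sequential loops; B instead describes the cube as geometric vector strokes (three horizontal edges, three verticals, diagonals) emitted as (row,col,char) points, and rasterizes them: for each row it scans the point list and fills the gaps between plotted points with spaces.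
-- outside the precondition, e.g. on draw_cube(-1): A returns '++\n++|\n||+\n++\n', B returns '\n+\n'
import Mathlib
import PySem

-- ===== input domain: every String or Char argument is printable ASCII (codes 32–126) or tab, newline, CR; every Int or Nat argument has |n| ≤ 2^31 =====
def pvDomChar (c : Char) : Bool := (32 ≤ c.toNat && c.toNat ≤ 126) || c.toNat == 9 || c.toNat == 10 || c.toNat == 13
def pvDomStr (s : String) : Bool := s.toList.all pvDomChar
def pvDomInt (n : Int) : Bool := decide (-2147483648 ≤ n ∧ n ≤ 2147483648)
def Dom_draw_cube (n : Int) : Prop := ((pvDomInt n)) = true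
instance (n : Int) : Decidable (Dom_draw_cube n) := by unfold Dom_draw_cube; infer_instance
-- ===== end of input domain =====

-- B replaces A's seven per-region string-formula loops by a vector-stroke rasterizer:
-- the cube is described as geometric strokes emitted as (row, col, char) points and each
-- row is rendered by scanning the point list, filling gaps with spaces (objective:
-- alternative algorithm; same cost).

-- ===== PORT A =====
-- strings are ported on List Char (PySem.Chars); String.ofList only at the very end
def pvHedgeA (n : Int) : List Char :=
  ['+'] ++ PySem.List.pyRepeat (PySem.List.pyRepeat ['-'] 2) n ++ ['+']

def pvGapA (n : Int) : List Char := PySem.List.pyRepeat [' '] n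

def draw_cube (n : Int) : String :=
  let d := PySem.Int.floordiv n 2
  let cube := pvGapA (d + 1) ++ pvHedgeA n ++ ['\n']
  let cube := (PySem.List.pyRange d 0 (-1)).foldl
    (fun acc i => acc ++ pvGapA i ++ ['/'] ++ pvGapA (2 * n) ++ ['/'] ++ pvGapA (d - i) ++ ['|', '\n']) cube
  let cube := cube ++ pvHedgeA n ++ pvGapA d ++ ['|', '\n']
  let cube := (PySem.List.pyRange 0 (n - d - 1) 1).foldl
    (fun acc _ => acc ++ ['|'] ++ pvGapA (2 * n) ++ ['|'] ++ pvGapA d ++ ['|', '\n']) cube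
  let cube := cube ++ ['|'] ++ pvGapA (2 * n) ++ ['|'] ++ pvGapA d ++ ['+', '\n']
  let cube := (PySem.List.pyRange d 0 (-1)).foldl
    (fun acc i => acc ++ ['|'] ++ pvGapA (2 * n) ++ ['|'] ++ pvGapA (i - 1) ++ ['/', '\n']) cube
  String.ofList (cube ++ pvHedgeA n ++ ['\n'])

-- ===== PORT B =====
-- the stroke list of Source B: each stroke is a list of (row, col, char) points
def pvStrokes (n : Int) : List (Int × Int × Char) :=
  let d := PySem.Int.floordiv n 2
  let body := max (n - d - 1) 0
  let h := 2 * d + body + 4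
  let top := 2 * n + d + 2
  ([] : List (Int × Int × Char))
  ++ (PySem.List.pyRange (d + 1) (top + 1) 1).map (fun c => (0, c, if c = d + 1 ∨ c = top then '+' else '-'))
  ++ (PySem.List.pyRange 1 (d + 1) 1).map (fun r => (r, d + 1 - r, '/'))
  ++ (PySem.List.pyRange (d + 2) (h - 1) 1).map (fun r => (r, 0, '|'))
  ++ (PySem.List.pyRange 0 (2 * n + 2) 1).map (fun c => (d + 1, c, if c = 0 ∨ c = 2 * n + 1 then '+' else '-'))
  ++ (PySem.List.pyRange (d + 2) (h - 1) 1).map (fun r => (r, 2 * n + 1, '|'))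
  ++ (PySem.List.pyRange 1 (d + 1) 1).map (fun r => (r, top - r, '/'))
  ++ (PySem.List.pyRange (d + 3 + body) (h - 1) 1).map (fun r => (r, 2 * n + h - r, '/'))
  ++ (PySem.List.pyRange 1 (d + 2 + body) 1).map (fun r => (r, top, '|'))
  ++ [(d + 2 + body, top, '+')]
  ++ (PySem.List.pyRange 0 (2 * n + 2) 1).map (fun c => (h - 1, c, if c = 0 ∨ c = 2 * n + 1 then '+' else '-'))

-- Source B bins the points by row (buckets.setdefault(r, []).append((c, ch)))
def pvBuckets (strokes : List (Int × Int × Char)) : PySem.Dict Int (List (Int × Char)) :=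
  strokes.foldl (fun d p => d.modify p.1 [] (· ++ [p.2])) PySem.Dict.empty

-- plot one point: fill the gap with spaces, emit the char, advance the cursor
def pvPlot (st : Int × List Char) (q : Int × Char) : Int × List Char :=
  (q.1 + 1, st.2 ++ PySem.List.pyRepeat [' '] (q.1 - st.1) ++ [q.2])

-- render row r of Source B: scan its bucket, filling gaps with spaces
def pvRender (r : Int) (strokes : List (Int × Int × Char)) : List Char :=
  (((pvBuckets strokes).getD r []).foldl pvPlot (0, [])).2

def draw_cube_alt (n : Int) : String :=
  let d := PySem.Int.floordiv n 2
  let body := max (n - d - 1) 0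
  let h := 2 * d + body + 4
  let strokes := pvStrokes n
  let rows := (PySem.List.pyRange 0 h 1).foldl (fun acc r => acc ++ [pvRender r strokes]) []
  String.ofList (PySem.Chars.join ['\n'] rows ++ ['\n'])

-- ===== PRECONDITION & SPEC =====
-- Pre_ restricts to the natural domain of the task (a cube of nonnegative size): for
-- negative n, A's output is an artefact of Python's negative string repetition and B's
-- of empty stroke ranges, and neither draws anything.
def Pre_draw_cube (n : Int) : Prop := 0 ≤ n
instance (n : Int) : Decidable (Pre_draw_cube n) := by unfold Pre_draw_cube; infer_instance

def pvWitness_draw_cube : Int := (3)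

def Spec_draw_cube (n : Int) (out : String) : Prop := out = draw_cube_alt n
instance (n : Int) (out : String) : Decidable (Spec_draw_cube n out) := by unfold Spec_draw_cube; infer_instance

-- ===== CLAIM (what is proved, stated in full; the proofs are below) =====
def Claim_equal_draw_cube : Prop := ∀ (n : Int), Dom_draw_cube n → Pre_draw_cube n → Spec_draw_cube n (draw_cube n)

-- ===== LEMMAS AND PROOFS =====
-- proof-side view of the rasterizer: one conditional scan over the whole point list
def pvStep (r : Int) (st : Int × List Char) (p : Int × Int × Char) : Int × List Char :=
  if p.1 = r then (p.2.1 + 1, st.2 ++ PySem.List.pyRepeat [' '] (p.2.1 - st.1) ++ [p.2.2]) else st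

-- binning by row then scanning the bucket = one conditional scan over all points
theorem pvRender_eq (r : Int) (strokes : List (Int × Int × Char)) :
    pvRender r strokes = (strokes.foldl (pvStep r) (0, ([] : List Char))).2 := by
  rw [pvRender, pvBuckets, PySem.Dict.getD_foldl_modify_append]
  rw [show (PySem.Dict.empty : PySem.Dict Int (List (Int × Char))).getD r [] = [] from rfl,
      List.nil_append, List.foldl_map, ← PySem.List.foldl_if_eq_foldl_filter]
  apply congrArg
  apply PySem.List.foldl_congr_mem
  intro acc x _
  by_cases h : x.1 = r <;> simp [pvStep, pvPlot, h]
-- a stroke whose points all lie on other rows leaves the scan state unchanged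
theorem pvSkip (r : Int) (l : List (Int × Int × Char)) (st : Int × List Char)
    (h : ∀ p ∈ l, p.1 ≠ r) : l.foldl (pvStep r) st = st := by
  induction l generalizing st with
  | nil => rfl
  | cons p t ih =>
      rw [List.foldl_cons, pvStep, if_neg (h p (by simp))]
      exact ih st (fun q hq => h q (by simp [hq]))

theorem pvSkipRange (r a b : Int) (f : Int → Int × Int × Char) (st : Int × List Char)
    (h : ∀ x, a ≤ x → x < b → (f x).1 ≠ r) :
    ((PySem.List.pyRange a b 1).map f).foldl (pvStep r) st = st := by
  refine pvSkip r _ st (fun p hp => ?_)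
  obtain ⟨x, hx, rfl⟩ := List.mem_map.1 hp
  rw [PySem.List.mem_pyRange_one] at hx
  exact h x hx.1 hx.2

-- a vertical/diagonal stroke over rows [a,b) plots exactly one point on row r
theorem pvSingle (r a b : Int) (col : Int → Int) (ch : Char) (st : Int × List Char)
    (h1 : a ≤ r) (h2 : r < b) :
    ((PySem.List.pyRange a b 1).map (fun x => (x, col x, ch))).foldl (pvStep r) st
      = (col r + 1, st.2 ++ PySem.List.pyRepeat [' '] (col r - st.1) ++ [ch]) := by
  rw [PySem.List.pyRange_one_append a r b h1 (le_of_lt h2),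
      PySem.List.pyRange_one_cons h2, List.map_append, List.map_cons,
      List.foldl_append, List.foldl_cons]
  rw [pvSkipRange r a r _ st (fun x _ hx => by dsimp only; omega)]
  rw [show pvStep r st (r, col r, ch)
        = (col r + 1, st.2 ++ PySem.List.pyRepeat [' '] (col r - st.1) ++ [ch]) from by
      simp [pvStep]]
  exact pvSkipRange r (r+1) b _ _ (fun x hx _ => by dsimp only; omega)

-- scanning a contiguous horizontal stroke starting at the cursor emits its chars
theorem pvContig (r lo : Int) (m : Nat) (g : Int → Char) (acc : List Char) :
    ((PySem.List.pyRange lo (lo + m) 1).map (fun c => (r, c, g c))).foldl (pvStep r) (lo, acc)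
      = (lo + m, acc ++ (List.range m).map (fun (k : Nat) => g (lo + (k : Int)))) := by
  induction m generalizing lo acc with
  | zero => simp [PySem.List.pyRange_one_eq_nil]
  | succ m ih =>
      rw [PySem.List.pyRange_one_cons (by omega), List.map_cons, List.foldl_cons]
      rw [show pvStep r (lo, acc) (r, lo, g lo) = (lo + 1, acc ++ [g lo]) from by
        simp [pvStep, PySem.List.pyRepeat]]
      rw [show lo + ((m + 1 : Nat) : Int) = (lo + 1) + (m : Int) from by push_cast; ring]
      rw [ih (lo + 1) (acc ++ [g lo])]
      rw [Prod.mk.injEq]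
      refine ⟨by omega, ?_⟩
      · rw [List.range_succ_eq_map, List.map_cons, List.map_map]
        simp only [List.append_assoc, List.singleton_append, Nat.cast_zero, add_zero]
        congr 1
        congr 1
        refine List.map_congr_left (fun k _ => ?_)
        simp only [Function.comp_apply]
        congr 1
        push_cast; ring

-- a full horizontal stroke on row r: gap up to its start, then its chars
theorem pvHline (r lo : Int) (m : Nat) (g : Int → Char) (cur : Int) (acc : List Char) :
    ((PySem.List.pyRange lo (lo + ((m : Int) + 1)) 1).map (fun c => (r, c, g c))).foldl (pvStep r) (cur, acc)
      = (lo + ((m : Int) + 1),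
         acc ++ PySem.List.pyRepeat [' '] (lo - cur) ++ (List.range (m + 1)).map (fun (k : Nat) => g (lo + (k : Int)))) := by
  rw [PySem.List.pyRange_one_cons (by omega), List.map_cons, List.foldl_cons]
  rw [show pvStep r (cur, acc) (r, lo, g lo)
        = (lo + 1, acc ++ PySem.List.pyRepeat [' '] (lo - cur) ++ [g lo]) from by simp [pvStep]]
  rw [show lo + ((m : Int) + 1) = (lo + 1) + (m : Int) from by ring]
  rw [pvContig r (lo + 1) m g _]
  rw [Prod.mk.injEq]
  refine ⟨rfl, ?_⟩
  · rw [List.range_succ_eq_map, List.map_cons, List.map_map]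
    simp only [List.append_assoc, List.singleton_append, Nat.cast_zero, add_zero]
    congr 2
    congr 1
    refine List.map_congr_left (fun k _ => ?_)
    simp only [Function.comp_apply]
    congr 1
    push_cast; ring

-- pvHline with an arbitrary scan state
theorem pvHline' (r lo : Int) (m : Nat) (g : Int → Char) (st : Int × List Char) :
    ((PySem.List.pyRange lo (lo + ((m : Int) + 1)) 1).map (fun c => (r, c, g c))).foldl (pvStep r) st
      = (lo + ((m : Int) + 1),
         st.2 ++ PySem.List.pyRepeat [' '] (lo - st.1) ++ (List.range (m + 1)).map (fun (k : Nat) => g (lo + (k : Int)))) := by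
  obtain ⟨cur, acc⟩ := st
  exact pvHline r lo m g cur acc

-- the chars a horizontal-edge stroke emits are '+', 2n dashes, '+'
theorem pvDashRep (m : Nat) : PySem.List.pyRepeat ['-', '-'] (m : Int) = List.replicate (2 * m) '-' := by
  induction m with
  | zero => rfl
  | succ m ih =>
      rw [PySem.List.pyRepeat] at *
      rw [show ((m + 1 : Nat) : Int).toNat = m + 1 from by omega] at *
      rw [show (m : Int).toNat = m from by omega] at ih
      rw [List.replicate_succ, List.flatten_cons, ih]
      rw [show 2 * (m + 1) = 2 * m + 2 from by ring]
      simp [List.replicate_succ]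

theorem pvHedgeChars (lo : Int) (m : Nat) :
    (List.range (2 * m + 2)).map
        (fun (k : Nat) => if lo + (k : Int) = lo ∨ lo + (k : Int) = lo + (2 * (m : Int) + 1) then '+' else '-')
      = pvHedgeA (m : Int) := by
  rw [pvHedgeA, show PySem.List.pyRepeat (PySem.List.pyRepeat ['-'] 2) (m : Int)
        = PySem.List.pyRepeat ['-', '-'] (m : Int) from rfl, pvDashRep]
  rw [show 2 * m + 2 = (2 * m + 1) + 1 from by ring, List.range_succ, List.map_append]
  rw [List.range_succ_eq_map, List.map_cons, List.map_map]
  have h1 : (fun (k : Nat) => if lo + (k : Int) = lo ∨ lo + (k : Int) = lo + (2 * (m : Int) + 1) then '+' else '-') 0 = '+' := by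
    simp
  have h2 : (List.range (2 * m)).map
      ((fun (k : Nat) => if lo + (k : Int) = lo ∨ lo + (k : Int) = lo + (2 * (m : Int) + 1) then '+' else '-') ∘ Nat.succ)
      = List.replicate (2 * m) '-' := by
    rw [show List.replicate (2 * m) '-' = (List.range (2 * m)).map (fun _ => '-') from by
      rw [List.map_const', List.length_range]]
    refine List.map_congr_left (fun k hk => ?_)
    rw [List.mem_range] at hk
    simp only [Function.comp_apply]
    rw [if_neg (by push_cast; omega)]
  have h3 : (fun (k : Nat) => if lo + (k : Int) = lo ∨ lo + (k : Int) = lo + (2 * (m : Int) + 1) then '+' else '-') (2 * m + 1) = '+' := by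
    simp
  rw [h2]
  simp only [List.map_cons, List.map_nil, h1, h3]
  rfl

-- condition bridge used for every horizontal edge
theorem pvHedgeMap (n lo hi : Int) (hn : 0 ≤ n) (hhi : hi = lo + 2 * n + 1) :
    (List.range (2 * n.toNat + 1 + 1)).map
        (fun (k : Nat) => if lo + (k : Int) = lo ∨ lo + (k : Int) = hi then '+' else '-')
      = pvHedgeA n := by
  have h2 : ((n.toNat : Nat) : Int) = n := by omega
  have hch := pvHedgeChars lo n.toNat
  rw [h2] at hch
  rw [show 2 * n.toNat + 1 + 1 = 2 * n.toNat + 2 from rfl, ← hch]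
  refine List.map_congr_left (fun k hk => ?_)
  have hiff : (lo + (k : Int) = lo ∨ lo + (k : Int) = hi)
      ↔ (lo + (k : Int) = lo ∨ lo + (k : Int) = lo + (2 * n + 1)) := by
    omega
  simp only [hiff]

-- row 0: the back top edge, indented one past the diagonal band
theorem pvRow0 (n d body : Int) (hn : 0 ≤ n) (hd : PySem.Int.floordiv n 2 = d)
    (hb : max (n - d - 1) 0 = body) (hd0 : 0 ≤ d) (hb0 : 0 ≤ body) :
    pvRender 0 (pvStrokes n) = pvGapA (d + 1) ++ pvHedgeA n := by
  rw [pvRender_eq, pvStrokes]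
  rw [hd, hb]
  simp only [List.nil_append, List.foldl_append]
  rw [show (2 * n + d + 2 + 1 : Int) = (d + 1) + (((2 * n.toNat + 1 : Nat) : Int) + 1) from by push_cast; omega]
  rw [pvHline 0 (d + 1) (2 * n.toNat + 1) _ 0 []]
  rw [pvSkipRange 0 1 (d + 1) _ _ (fun x hx _ => by dsimp only; omega)]
  rw [pvSkipRange 0 (d + 2) (2 * d + body + 4 - 1) _ _ (fun x hx _ => by dsimp only; omega)]
  rw [pvSkipRange 0 0 (2 * n + 2) _ _ (fun x _ _ => by dsimp only; omega)]
  rw [pvSkipRange 0 (d + 2) (2 * d + body + 4 - 1) _ _ (fun x hx _ => by dsimp only; omega)]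
  rw [pvSkipRange 0 1 (d + 1) _ _ (fun x hx _ => by dsimp only; omega)]
  rw [pvSkipRange 0 (d + 3 + body) (2 * d + body + 4 - 1) _ _ (fun x hx _ => by dsimp only; omega)]
  rw [pvSkipRange 0 1 (d + 2 + body) _ _ (fun x hx _ => by dsimp only; omega)]
  rw [List.foldl_cons, List.foldl_nil, pvStep, if_neg (by dsimp only; omega)]
  rw [pvSkipRange 0 0 (2 * n + 2) _ _ (fun x _ _ => by dsimp only; omega)]
  simp only [List.nil_append, sub_zero]
  congr 1
  exact pvHedgeMap n (d + 1) (2 * n + d + 2) hn (by ring)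

theorem pvGapEq (a b : Int) (h : a = b) : PySem.List.pyRepeat [' '] a = pvGapA b := by
  rw [pvGapA, h]

theorem pvGap0 : PySem.List.pyRepeat [' '] (0 - 0) = [] := rfl

-- rows 1..d: the top diagonal band
theorem pvRowDiagTop (n d body r : Int) (_hn : 0 ≤ n) (hd : PySem.Int.floordiv n 2 = d)
    (hb : max (n - d - 1) 0 = body) (hd0 : 0 ≤ d) (hb0 : 0 ≤ body)
    (h1 : 1 ≤ r) (h2 : r ≤ d) :
    pvRender r (pvStrokes n)
      = pvGapA (d + 1 - r) ++ ['/'] ++ pvGapA (2 * n) ++ ['/'] ++ pvGapA (d - (d + 1 - r)) ++ ['|'] := by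
  rw [pvRender_eq, pvStrokes]
  rw [hd, hb]
  simp only [List.nil_append, List.foldl_append]
  rw [pvSkipRange r (d + 1) (2 * n + d + 2 + 1) _ _ (fun x _ _ => by dsimp only; omega)]
  rw [pvSingle r 1 (d + 1) _ '/' _ h1 (by omega)]
  rw [pvSkipRange r (d + 2) (2 * d + body + 4 - 1) _ _ (fun x hx _ => by dsimp only; omega)]
  rw [pvSkipRange r 0 (2 * n + 2) _ _ (fun x _ _ => by dsimp only; omega)]
  rw [pvSkipRange r (d + 2) (2 * d + body + 4 - 1) _ _ (fun x hx _ => by dsimp only; omega)]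
  rw [pvSingle r 1 (d + 1) _ '/' _ h1 (by omega)]
  rw [pvSkipRange r (d + 3 + body) (2 * d + body + 4 - 1) _ _ (fun x hx _ => by dsimp only; omega)]
  rw [pvSingle r 1 (d + 2 + body) _ '|' _ h1 (by omega)]
  rw [List.foldl_cons, List.foldl_nil, pvStep, if_neg (by dsimp only; omega)]
  rw [pvSkipRange r 0 (2 * n + 2) _ _ (fun x _ _ => by dsimp only; omega)]
  dsimp only
  rw [pvGapEq (d + 1 - r - 0) (d + 1 - r) (by ring)]
  rw [pvGapEq (2 * n + d + 2 - r - (d + 1 - r + 1)) (2 * n) (by ring)]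
  rw [pvGapEq (2 * n + d + 2 - (2 * n + d + 2 - r + 1)) (d - (d + 1 - r)) (by ring)]
  simp [List.append_assoc]

-- row d+1: the front top edge, then the right back vertical
theorem pvRowTrans1 (n d body : Int) (hn : 0 ≤ n) (hd : PySem.Int.floordiv n 2 = d)
    (hb : max (n - d - 1) 0 = body) (hd0 : 0 ≤ d) (hb0 : 0 ≤ body) :
    pvRender (d + 1) (pvStrokes n) = pvHedgeA n ++ pvGapA d ++ ['|'] := by
  rw [pvRender_eq, pvStrokes]
  rw [hd, hb]
  simp only [List.nil_append, List.foldl_append]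
  rw [pvSkipRange (d + 1) (d + 1) (2 * n + d + 2 + 1) _ _ (fun x _ _ => by dsimp only; omega)]
  rw [pvSkipRange (d + 1) 1 (d + 1) _ _ (fun x _ hx => by dsimp only; omega)]
  rw [pvSkipRange (d + 1) (d + 2) (2 * d + body + 4 - 1) _ _ (fun x hx _ => by dsimp only; omega)]
  rw [show (2 * n + 2 : Int) = 0 + (((2 * n.toNat + 1 : Nat) : Int) + 1) from by push_cast; omega]
  rw [pvHline' (d + 1) 0 (2 * n.toNat + 1) _ _]
  rw [pvSkipRange (d + 1) (d + 2) (2 * d + body + 4 - 1) _ _ (fun x hx _ => by dsimp only; omega)]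
  rw [pvSkipRange (d + 1) 1 (d + 1) _ _ (fun x _ hx => by dsimp only; omega)]
  rw [pvSkipRange (d + 1) (d + 3 + body) (2 * d + body + 4 - 1) _ _ (fun x hx _ => by dsimp only; omega)]
  rw [pvSingle (d + 1) 1 (d + 2 + body) _ '|' _ (by omega) (by omega)]
  rw [List.foldl_cons, List.foldl_nil, pvStep, if_neg (by dsimp only; omega)]
  rw [pvSkipRange (d + 1) 0 (0 + (((2 * n.toNat + 1 : Nat) : Int) + 1)) _ _ (fun x _ _ => by dsimp only; omega)]
  dsimp only
  rw [pvGap0, pvHedgeMap n 0 (2 * n + 1) hn (by ring)]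
  rw [pvGapEq (2 * n + d + 2 - (0 + (((2 * n.toNat + 1 : Nat) : Int) + 1))) d (by push_cast; omega)]
  simp [List.append_assoc]

-- rows d+2 .. d+1+body: the vertical body band
theorem pvRowBody (n d body r : Int) (_hn : 0 ≤ n) (hd : PySem.Int.floordiv n 2 = d)
    (hb : max (n - d - 1) 0 = body) (hd0 : 0 ≤ d) (_hb0 : 0 ≤ body)
    (h1 : d + 2 ≤ r) (h2 : r ≤ d + 1 + body) :
    pvRender r (pvStrokes n) = ['|'] ++ pvGapA (2 * n) ++ ['|'] ++ pvGapA d ++ ['|'] := by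
  rw [pvRender_eq, pvStrokes]
  rw [hd, hb]
  simp only [List.nil_append, List.foldl_append]
  rw [pvSkipRange r (d + 1) (2 * n + d + 2 + 1) _ _ (fun x _ _ => by dsimp only; omega)]
  rw [pvSkipRange r 1 (d + 1) _ _ (fun x _ hx => by dsimp only; omega)]
  rw [pvSingle r (d + 2) (2 * d + body + 4 - 1) _ '|' _ h1 (by omega)]
  rw [pvSkipRange r 0 (2 * n + 2) _ _ (fun x _ _ => by dsimp only; omega)]
  rw [pvSingle r (d + 2) (2 * d + body + 4 - 1) _ '|' _ h1 (by omega)]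
  rw [pvSkipRange r 1 (d + 1) _ _ (fun x _ hx => by dsimp only; omega)]
  rw [pvSkipRange r (d + 3 + body) (2 * d + body + 4 - 1) _ _ (fun x hx _ => by dsimp only; omega)]
  rw [pvSingle r 1 (d + 2 + body) _ '|' _ (by omega) (by omega)]
  rw [List.foldl_cons, List.foldl_nil, pvStep, if_neg (by dsimp only; omega)]
  rw [pvSkipRange r 0 (2 * n + 2) _ _ (fun x _ _ => by dsimp only; omega)]
  dsimp only
  rw [pvGap0]
  rw [pvGapEq (2 * n + 1 - (0 + 1)) (2 * n) (by ring)]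
  rw [pvGapEq (2 * n + d + 2 - (2 * n + 1 + 1)) d (by ring)]
  simp [List.append_assoc]

-- row d+2+body: the bottom-right '+' corner row
theorem pvRowTrans2 (n d body : Int) (_hn : 0 ≤ n) (hd : PySem.Int.floordiv n 2 = d)
    (hb : max (n - d - 1) 0 = body) (hd0 : 0 ≤ d) (hb0 : 0 ≤ body) :
    pvRender (d + 2 + body) (pvStrokes n) = ['|'] ++ pvGapA (2 * n) ++ ['|'] ++ pvGapA d ++ ['+'] := by
  rw [pvRender_eq, pvStrokes]
  rw [hd, hb]
  simp only [List.nil_append, List.foldl_append]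
  rw [pvSkipRange (d + 2 + body) (d + 1) (2 * n + d + 2 + 1) _ _ (fun x _ _ => by dsimp only; omega)]
  rw [pvSkipRange (d + 2 + body) 1 (d + 1) _ _ (fun x _ hx => by dsimp only; omega)]
  rw [pvSingle (d + 2 + body) (d + 2) (2 * d + body + 4 - 1) _ '|' _ (by omega) (by omega)]
  rw [pvSkipRange (d + 2 + body) 0 (2 * n + 2) _ _ (fun x _ _ => by dsimp only; omega)]
  rw [pvSingle (d + 2 + body) (d + 2) (2 * d + body + 4 - 1) _ '|' _ (by omega) (by omega)]
  rw [pvSkipRange (d + 2 + body) 1 (d + 1) _ _ (fun x _ hx => by dsimp only; omega)]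
  rw [pvSkipRange (d + 2 + body) (d + 3 + body) (2 * d + body + 4 - 1) _ _ (fun x hx _ => by dsimp only; omega)]
  rw [pvSkipRange (d + 2 + body) 1 (d + 2 + body) _ _ (fun x _ hx => by dsimp only; omega)]
  rw [List.foldl_cons, List.foldl_nil, pvStep, if_pos (by dsimp only)]
  rw [pvSkipRange (d + 2 + body) 0 (2 * n + 2) _ _ (fun x _ _ => by dsimp only; omega)]
  dsimp only
  rw [pvGap0]
  rw [pvGapEq (2 * n + 1 - (0 + 1)) (2 * n) (by ring)]
  rw [pvGapEq (2 * n + d + 2 - (2 * n + 1 + 1)) d (by ring)]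
  simp [List.append_assoc]

-- rows d+3+body .. 2d+body+2: the bottom diagonal band
theorem pvRowDiagBot (n d body r : Int) (_hn : 0 ≤ n) (hd : PySem.Int.floordiv n 2 = d)
    (hb : max (n - d - 1) 0 = body) (_hd0 : 0 ≤ d) (hb0 : 0 ≤ body)
    (h1 : d + 3 + body ≤ r) (h2 : r ≤ 2 * d + body + 2) :
    pvRender r (pvStrokes n)
      = ['|'] ++ pvGapA (2 * n) ++ ['|'] ++ pvGapA (d + 1 - (r - (d + body + 2)) - 1) ++ ['/'] := by
  rw [pvRender_eq, pvStrokes]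
  rw [hd, hb]
  simp only [List.nil_append, List.foldl_append]
  rw [pvSkipRange r (d + 1) (2 * n + d + 2 + 1) _ _ (fun x _ _ => by dsimp only; omega)]
  rw [pvSkipRange r 1 (d + 1) _ _ (fun x _ hx => by dsimp only; omega)]
  rw [pvSingle r (d + 2) (2 * d + body + 4 - 1) _ '|' _ (by omega) (by omega)]
  rw [pvSkipRange r 0 (2 * n + 2) _ _ (fun x _ _ => by dsimp only; omega)]
  rw [pvSingle r (d + 2) (2 * d + body + 4 - 1) _ '|' _ (by omega) (by omega)]
  rw [pvSkipRange r 1 (d + 1) _ _ (fun x _ hx => by dsimp only; omega)]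
  rw [pvSingle r (d + 3 + body) (2 * d + body + 4 - 1) _ '/' _ h1 (by omega)]
  rw [pvSkipRange r 1 (d + 2 + body) _ _ (fun x _ hx => by dsimp only; omega)]
  rw [List.foldl_cons, List.foldl_nil, pvStep, if_neg (by dsimp only; omega)]
  rw [pvSkipRange r 0 (2 * n + 2) _ _ (fun x _ _ => by dsimp only; omega)]
  dsimp only
  rw [pvGap0]
  rw [pvGapEq (2 * n + 1 - (0 + 1)) (2 * n) (by ring)]
  rw [pvGapEq (2 * n + (2 * d + body + 4) - r - (2 * n + 1 + 1)) (d + 1 - (r - (d + body + 2)) - 1) (by ring)]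
  simp [List.append_assoc]

-- row 2d+body+3: the bottom front edge
theorem pvRowBottom (n d body : Int) (hn : 0 ≤ n) (hd : PySem.Int.floordiv n 2 = d)
    (hb : max (n - d - 1) 0 = body) (hd0 : 0 ≤ d) (hb0 : 0 ≤ body) :
    pvRender (2 * d + body + 4 - 1) (pvStrokes n) = pvHedgeA n := by
  rw [pvRender_eq, pvStrokes]
  rw [hd, hb]
  simp only [List.nil_append, List.foldl_append]
  rw [pvSkipRange (2 * d + body + 4 - 1) (d + 1) (2 * n + d + 2 + 1) _ _ (fun x _ _ => by dsimp only; omega)]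
  rw [pvSkipRange (2 * d + body + 4 - 1) 1 (d + 1) _ _ (fun x _ hx => by dsimp only; omega)]
  rw [pvSkipRange (2 * d + body + 4 - 1) (d + 2) (2 * d + body + 4 - 1) _ _ (fun x _ hx => by dsimp only; omega)]
  rw [pvSkipRange (2 * d + body + 4 - 1) 0 (2 * n + 2)
        (fun c => (d + 1, c, if c = 0 ∨ c = 2 * n + 1 then '+' else '-')) _
        (fun x _ _ => by dsimp only; omega)]
  rw [pvSkipRange (2 * d + body + 4 - 1) (d + 2) (2 * d + body + 4 - 1) _ _ (fun x _ hx => by dsimp only; omega)]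
  rw [pvSkipRange (2 * d + body + 4 - 1) 1 (d + 1) _ _ (fun x _ hx => by dsimp only; omega)]
  rw [pvSkipRange (2 * d + body + 4 - 1) (d + 3 + body) (2 * d + body + 4 - 1) _ _ (fun x _ hx => by dsimp only; omega)]
  rw [pvSkipRange (2 * d + body + 4 - 1) 1 (d + 2 + body) _ _ (fun x _ hx => by dsimp only; omega)]
  rw [List.foldl_cons, List.foldl_nil, pvStep, if_neg (by dsimp only; omega)]
  rw [show (2 * n + 2 : Int) = 0 + (((2 * n.toNat + 1 : Nat) : Int) + 1) from by push_cast; omega]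
  rw [pvHline' (2 * d + body + 4 - 1) 0 (2 * n.toNat + 1) _ _]
  dsimp only
  rw [pvGap0, pvHedgeMap n 0 (2 * n + 1) hn (by ring)]
  simp

-- '\n'.join(lines) + '\n' is the concatenation of the newline-terminated lines
theorem pvJoinNl (ls : List (List Char)) (h : ls ≠ []) :
    PySem.Chars.join ['\n'] ls ++ ['\n'] = (ls.map (· ++ ['\n'])).flatten := by
  induction ls with
  | nil => simp at h
  | cons x t ih =>
    cases t with
    | nil => simp [PySem.Chars.join_singleton]
    | cons y u =>
      rw [PySem.Chars.join_cons_cons]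
      simp only [List.map_cons, List.flatten_cons] at *
      rw [List.append_assoc, List.append_assoc, ih (by simp)]
      simp [List.append_assoc]

-- A's countdown loop over range(d, 0, -1) re-indexed as the row segment [a+1, a+1+d)
theorem pvSeg (g : Int → List Char) (d a : Int) (hd : 0 ≤ d) :
    (PySem.List.pyRange d 0 (-1)).flatMap g
      = (PySem.List.pyRange (a + 1) (a + 1 + d) 1).flatMap (fun r => g (d + 1 - (r - a))) := by
  rw [PySem.List.pyRange_neg_one, PySem.List.pyRange_one, List.flatMap_map, List.flatMap_map]
  have h : (a + 1 + d - (a + 1)).toNat = (d - 0).toNat := by omega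
  rw [h]
  exact List.flatMap_congr (fun k _ => by congr 1; omega)

-- A's body loop over range(n-d-1) matched with the row segment [d+2, d+2+body)
theorem pvSegC (c : List Char) (n d body : Int) (hb : body = max (n - d - 1) 0) :
    (PySem.List.pyRange 0 (n - d - 1) 1).flatMap (fun _ => c)
      = (PySem.List.pyRange (d + 2) (d + 2 + body) 1).flatMap (fun _ => c) := by
  rw [PySem.List.pyRange_one, PySem.List.pyRange_one, List.flatMap_map, List.flatMap_map]
  have h : (d + 2 + body - (d + 2)).toNat = (n - d - 1 - 0).toNat := by omega
  rw [h]

theorem pvSeg0 (g : Int → List Char) (d : Int) (hd : 0 ≤ d) :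
    (PySem.List.pyRange d 0 (-1)).flatMap g
      = (PySem.List.pyRange 1 (d + 1) 1).flatMap (fun r => g (d + 1 - r)) := by
  rw [PySem.List.pyRange_neg_one, PySem.List.pyRange_one, List.flatMap_map, List.flatMap_map]
  have h : (d + 1 - 1).toNat = (d - 0).toNat := by omega
  rw [h]
  exact List.flatMap_congr (fun k _ => by congr 1; omega)

theorem pvRange_singleton (a b : Int) (h : b = a + 1) : PySem.List.pyRange a b 1 = [a] := by
  rw [h]; exact PySem.List.pyRange_one_singleton a

-- the whole cube: A's seven sequential region loops produce exactly B's rasterized rows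
theorem pvMain (n d body : Int) (hn : 0 ≤ n) (hd : PySem.Int.floordiv n 2 = d)
    (hb : max (n - d - 1) 0 = body) (hd0 : 0 ≤ d) (hb0 : 0 ≤ body) :
    ((PySem.List.pyRange d 0 (-1)).foldl
        (fun acc i => acc ++ ['|'] ++ pvGapA (2 * n) ++ ['|'] ++ pvGapA (i - 1) ++ ['/', '\n'])
        (((PySem.List.pyRange 0 (n - d - 1) 1).foldl
            (fun acc _ => acc ++ ['|'] ++ pvGapA (2 * n) ++ ['|'] ++ pvGapA d ++ ['|', '\n'])
            (((PySem.List.pyRange d 0 (-1)).foldl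
                (fun acc i => acc ++ pvGapA i ++ ['/'] ++ pvGapA (2 * n) ++ ['/'] ++ pvGapA (d - i) ++ ['|', '\n'])
                (pvGapA (d + 1) ++ pvHedgeA n ++ ['\n']))
              ++ pvHedgeA n ++ pvGapA d ++ ['|', '\n']))
          ++ ['|'] ++ pvGapA (2 * n) ++ ['|'] ++ pvGapA d ++ ['+', '\n']))
      ++ pvHedgeA n ++ ['\n']
    = PySem.Chars.join ['\n']
        ((PySem.List.pyRange 0 (2 * d + body + 4) 1).foldl
          (fun acc r => acc ++ [pvRender r (pvStrokes n)]) []) ++ ['\n'] := by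
  -- B side: rows list, join, split into the seven regions
  rw [PySem.List.foldl_append_singleton_eq_map, List.nil_append]
  rw [pvJoinNl _ (by
    simp only [ne_eq, List.map_eq_nil_iff]
    rw [PySem.List.pyRange_one_cons (by omega)]
    simp)]
  rw [← List.flatMap_def, List.flatMap_map]
  rw [PySem.List.pyRange_one_append 0 1 (2 * d + body + 4) (by omega) (by omega),
      PySem.List.pyRange_one_append 1 (d + 1) (2 * d + body + 4) (by omega) (by omega),
      PySem.List.pyRange_one_append (d + 1) (d + 2) (2 * d + body + 4) (by omega) (by omega),
      PySem.List.pyRange_one_append (d + 2) (d + 2 + body) (2 * d + body + 4) (by omega) (by omega),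
      PySem.List.pyRange_one_append (d + 2 + body) (d + body + 3) (2 * d + body + 4) (by omega) (by omega),
      PySem.List.pyRange_one_append (d + body + 3) (d + body + 3 + d) (2 * d + body + 4) (by omega) (by omega)]
  rw [pvRange_singleton 0 1 (by ring), pvRange_singleton (d + 1) (d + 2) (by ring),
      pvRange_singleton (d + 2 + body) (d + body + 3) (by ring),
      pvRange_singleton (d + body + 3 + d) (2 * d + body + 4) (by ring)]
  simp only [List.flatMap_append, List.flatMap_cons, List.flatMap_nil]
  rw [pvRow0 n d body hn hd hb hd0 hb0]
  rw [pvRowTrans1 n d body hn hd hb hd0 hb0]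
  rw [pvRowTrans2 n d body hn hd hb hd0 hb0]
  have hbot : pvRender (d + body + 3 + d) (pvStrokes n) = pvHedgeA n := by
    rw [show (d + body + 3 + d : Int) = 2 * d + body + 4 - 1 from by ring]
    exact pvRowBottom n d body hn hd hb hd0 hb0
  rw [hbot]
  have hdT : (PySem.List.pyRange 1 (d + 1) 1).flatMap (fun r => pvRender r (pvStrokes n) ++ ['\n'])
      = (PySem.List.pyRange 1 (d + 1) 1).flatMap (fun r =>
          pvGapA (d + 1 - r) ++ (['/'] ++ (pvGapA (2 * n) ++ (['/'] ++ (pvGapA (d - (d + 1 - r)) ++ ['|', '\n']))))) :=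
    List.flatMap_congr (fun r hr => by
      rw [PySem.List.mem_pyRange_one] at hr
      rw [pvRowDiagTop n d body r hn hd hb hd0 hb0 hr.1 (by omega)]
      simp [List.append_assoc])
  have hBd : (PySem.List.pyRange (d + 2) (d + 2 + body) 1).flatMap (fun r => pvRender r (pvStrokes n) ++ ['\n'])
      = (PySem.List.pyRange (d + 2) (d + 2 + body) 1).flatMap (fun _ =>
          ['|'] ++ (pvGapA (2 * n) ++ (['|'] ++ (pvGapA d ++ ['|', '\n'])))) :=
    List.flatMap_congr (fun r hr => by
      rw [PySem.List.mem_pyRange_one] at hr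
      rw [pvRowBody n d body r hn hd hb hd0 hb0 hr.1 (by omega)]
      simp [List.append_assoc])
  have hdB : (PySem.List.pyRange (d + body + 3) (d + body + 3 + d) 1).flatMap (fun r => pvRender r (pvStrokes n) ++ ['\n'])
      = (PySem.List.pyRange (d + body + 3) (d + body + 3 + d) 1).flatMap (fun r =>
          ['|'] ++ (pvGapA (2 * n) ++ (['|'] ++ (pvGapA (d + 1 - (r - (d + body + 2)) - 1) ++ ['/', '\n'])))) :=
    List.flatMap_congr (fun r hr => by
      rw [PySem.List.mem_pyRange_one] at hr
      rw [pvRowDiagBot n d body r hn hd hb hd0 hb0 (by omega) (by omega)]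
      simp [List.append_assoc])
  rw [hdT, hBd, hdB]
  -- A side: loops to flatMaps, then re-index into the same regions
  simp only [List.append_assoc]
  rw [PySem.List.foldl_append_eq_flatMap, PySem.List.foldl_append_eq_flatMap,
      PySem.List.foldl_append_eq_flatMap]
  rw [pvSeg0 (fun i => pvGapA i ++ (['/'] ++ (pvGapA (2 * n) ++ (['/'] ++ (pvGapA (d - i) ++ ['|', '\n']))))) d hd0]
  rw [pvSeg (fun i => ['|'] ++ (pvGapA (2 * n) ++ (['|'] ++ (pvGapA (i - 1) ++ ['/', '\n'])))) d (d + body + 2) hd0]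
  rw [pvSegC (['|'] ++ (pvGapA (2 * n) ++ (['|'] ++ (pvGapA d ++ ['|', '\n'])))) n d body hb.symm]
  rw [show (d + body + 2 + 1 : Int) = d + body + 3 from by ring]
  simp only [List.append_assoc, List.cons_append, List.nil_append]

-- ===== VERDICT (by name: the statement is the Claim_ definition above) =====
theorem draw_cube_spec : Claim_equal_draw_cube := by
  intro n _ hn
  show draw_cube n = draw_cube_alt n
  have hd0 : 0 ≤ PySem.Int.floordiv n 2 := by
    rw [PySem.Int.floordiv_eq_ediv_of_pos (by omega)]
    exact Int.ediv_nonneg hn (by omega)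
  exact congrArg String.ofList
    (pvMain n (PySem.Int.floordiv n 2) (max (n - PySem.Int.floordiv n 2 - 1) 0)
      hn rfl rfl hd0 (le_max_right _ _))
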